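-- pv_equiv track=rewrite | github.com/ruben-sa-brito/codewars | python/6 kyu/count_feelings.py | count_feelings
-- ===== SOURCE A (Python) =====
-- def count_feelings(st, arr):
--     feelings = arr.copy()
--
--     for word in arr:
--         temp = st
--         for chr in word:
--             if chr not in temp:
--                 feelings.remove(word)
--                 break
--             temp = temp.replace(chr, "", 1)
--
--     total_feel = len(feelings)
--     if total_feel == 1: return f"{total_feel} feeling."
--     return f"{total_feel} feelings."
-- ===== SOURCE B (Python) =====
-- # B: build the letter budget once (Counter) and count matching words additively,
-- # instead of A's per-word char-by-char consume-with-break loop over a shrinking copy of arr.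
-- from collections import Counter
--
-- def count_feelings(st, arr):
--     avail = Counter(st)
--     total = sum(1 for word in arr if Counter(word) <= avail)
--     if total == 1:
--         return f"{total} feeling."
--     return f"{total} feelings."
-- ===== Notes on version B (the rewrite author's own statement) =====
-- stated objective: faster
-- what changed: B builds one Counter letter budget from st and counts words whose own Counter fits under it additively, replacing A's per-word char-by-char consume-with-break loop that rebuilds st and mutates a shrinking copy of arr via list.remove.
import Mathlib
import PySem

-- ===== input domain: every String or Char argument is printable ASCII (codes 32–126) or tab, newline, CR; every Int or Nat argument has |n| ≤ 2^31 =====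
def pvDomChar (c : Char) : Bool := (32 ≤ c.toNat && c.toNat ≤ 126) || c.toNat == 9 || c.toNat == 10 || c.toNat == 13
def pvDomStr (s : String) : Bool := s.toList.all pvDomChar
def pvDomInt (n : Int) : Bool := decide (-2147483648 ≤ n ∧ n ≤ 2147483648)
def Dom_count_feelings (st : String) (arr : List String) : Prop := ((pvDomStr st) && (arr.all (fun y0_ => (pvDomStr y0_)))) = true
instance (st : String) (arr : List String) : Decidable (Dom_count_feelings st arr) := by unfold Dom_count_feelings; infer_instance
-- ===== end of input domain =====

-- B replaces A's char-by-char consume-with-break loop over a shrinking copy of arr by a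
-- Counter built once from st, compared table-to-table per word, counting successes additively.

-- ===== PORT A =====
-- hand port of temp.replace(chr, "", 1) for a SINGLE-char chr: drops the first occurrence (exact there)
def pvReplaceOne (cs : List Char) (c : Char) : List Char :=
  match cs with
  | [] => []
  | x :: xs => if x = c then xs else x :: pvReplaceOne xs c

-- the inner 'for chr in word' loop with its break; on a missing char, word is removed from feelings
-- (remove? always succeeds here — word occurs in feelings — so the getD default is never used)
def pvInnerA (feelings : List String) (word : String) (temp : List Char) (chars : List Char) : List String :=
  match chars with
  | [] => feelings
  | c :: rest =>
    if PySem.Chars.isIn [c] temp then pvInnerA feelings word (pvReplaceOne temp c) rest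
    else (PySem.List.remove? feelings word).getD feelings

def count_feelings (st : String) (arr : List String) : String :=
  let feelings := arr.foldl (fun fl word => pvInnerA fl word st.toList word.toList) arr
  let total_feel : Int := feelings.length
  if total_feel = 1 then PySem.Int.toStr total_feel ++ " feeling."
  else PySem.Int.toStr total_feel ++ " feelings."

-- ===== PORT B =====
def count_feelings_alt (st : String) (arr : List String) : String :=
  let avail := PySem.Dict.counter st.toList
  let total : Int := (arr.map (fun word =>
    if (PySem.Dict.counter word.toList).items.all (fun kv => kv.2 ≤ avail.getD kv.1 0)
    then (1 : Int) else 0)).sum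
  if total = 1 then PySem.Int.toStr total ++ " feeling."
  else PySem.Int.toStr total ++ " feelings."

-- ===== PRECONDITION & SPEC =====
def Spec_count_feelings (st : String) (arr : List String) (out : String) : Prop := out = count_feelings_alt st arr
instance (st : String) (arr : List String) (out : String) : Decidable (Spec_count_feelings st arr out) := by unfold Spec_count_feelings; infer_instance

-- ===== CLAIM (what is proved, stated in full; the proofs are below) =====
def Claim_equal_count_feelings : Prop := ∀ (st : String) (arr : List String), Dom_count_feelings st arr → Spec_count_feelings st arr (count_feelings st arr)

-- ===== LEMMAS AND PROOFS =====

-- A's inner loop success condition, as a standalone recursion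
def pvOkA (temp chars : List Char) : Bool :=
  match chars with
  | [] => true
  | c :: rest => if c ∈ temp then pvOkA (temp.erase c) rest else false

lemma pvReplaceOne_eq_erase (cs : List Char) (c : Char) : pvReplaceOne cs c = cs.erase c := by
  induction cs with
  | nil => rfl
  | cons x xs ih =>
    by_cases h : x = c <;> simp [pvReplaceOne, h, ih]

lemma pvIsIn_singleton (c : Char) (l : List Char) : PySem.Chars.isIn [c] l = l.contains c := by
  by_cases h : c ∈ l
  · rw [List.contains_iff_mem.mpr h]
    exact (PySem.Chars.isIn_iff_infix _ _).mpr ((List.singleton_infix_iff c l).mpr h)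
  · have hf : PySem.Chars.isIn [c] l = false :=
      (PySem.Chars.isIn_eq_false_iff _ _).mpr (fun hinf => h ((List.singleton_infix_iff c l).mp hinf))
    simp [hf, h]

lemma pvInnerA_eq (fl : List String) (w : String) (temp chars : List Char) :
    pvInnerA fl w temp chars =
      if pvOkA temp chars then fl else (PySem.List.remove? fl w).getD fl := by
  induction chars generalizing temp with
  | nil => rfl
  | cons c rest ih =>
    simp only [pvInnerA, pvOkA, pvIsIn_singleton, pvReplaceOne_eq_erase]
    by_cases h : c ∈ temp
    · simp [h, ih]
    · simp [h]

lemma pvOkA_iff (temp chars : List Char) :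
    pvOkA temp chars = true ↔ ∀ c ∈ chars, chars.count c ≤ temp.count c := by
  induction chars generalizing temp with
  | nil => simp [pvOkA]
  | cons c rest ih =>
    by_cases h : c ∈ temp
    · have htc : 1 ≤ temp.count c := List.one_le_count_iff.mpr h
      simp only [pvOkA, if_pos h, ih]
      constructor
      · intro hall x hx
        rcases List.mem_cons.mp hx with rfl | hx'
        · by_cases hc : x ∈ rest
          · have hr := hall x hc
            rw [List.count_erase_self] at hr
            simp only [List.count_cons_self]
            omega
          · rw [List.count_cons_self, List.count_eq_zero.mpr hc]
            omega
        · by_cases hxc : x = c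
          · subst hxc
            have hr := hall x hx'
            rw [List.count_erase_self] at hr
            simp only [List.count_cons_self]
            omega
          · have hr := hall x hx'
            rw [List.count_erase_of_ne hxc] at hr
            simpa [List.count_cons, Ne.symm hxc] using hr
      · intro hall x hx
        by_cases hxc : x = c
        · subst hxc
          have hr := hall x (by simp)
          rw [List.count_erase_self]
          simp only [List.count_cons_self] at hr
          omega
        · have hr := hall x (List.mem_cons_of_mem _ hx)
          rw [List.count_erase_of_ne hxc]
          simpa [List.count_cons, Ne.symm hxc] using hr
    · have h0 : temp.count c = 0 := List.count_eq_zero.mpr h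
      simp only [pvOkA, if_neg h, Bool.false_eq_true, false_iff]
      intro hall
      have hr := hall c (by simp)
      rw [List.count_cons_self, h0] at hr
      omega

-- A's foldl over arr: length of the surviving feelings list
lemma pvFoldA_length (st : String) (ws fl : List String)
    (hsub : ∀ w, ws.count w ≤ fl.count w) (hlen : ws.length ≤ fl.length) :
    (ws.foldl (fun fl word => pvInnerA fl word st.toList word.toList) fl).length
      = fl.length - ws.countP (fun w => !pvOkA st.toList w.toList) := by
  induction ws generalizing fl with
  | nil => simp
  | cons w ws ih =>
    have hwfl : w ∈ fl := by
      have hc := hsub w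
      rw [List.count_cons_self] at hc
      exact List.one_le_count_iff.mp (by omega)
    rw [List.foldl_cons, pvInnerA_eq]
    by_cases hok : pvOkA st.toList w.toList
    · rw [if_pos hok, ih fl ?_ ?_]
      · simp [hok]
      · intro x
        have := hsub x
        by_cases hxw : x = w
        · subst hxw; rw [List.count_cons_self] at this; omega
        · rwa [List.count_cons_of_ne (Ne.symm hxw)] at this
      · simpa using Nat.le_of_succ_le (by simpa using hlen)
    · rw [if_neg hok, PySem.List.remove?_eq_some_erase fl w hwfl, Option.getD_some]
      have hlen' : ws.length ≤ (fl.erase w).length := by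
        rw [List.length_erase_of_mem hwfl]
        simp only [List.length_cons] at hlen
        omega
      rw [ih (fl.erase w) ?_ hlen']
      · have h1 : (fl.erase w).length = fl.length - 1 := List.length_erase_of_mem hwfl
        have h2 : ws.countP (fun w => !pvOkA st.toList w.toList) ≤ ws.length :=
          List.countP_le_length
        rw [h1]
        simp [eq_false_of_ne_true hok]
        omega
      · intro x
        have := hsub x
        by_cases hxw : x = w
        · subst hxw
          rw [List.count_cons_self] at this
          rw [List.count_erase_self]
          omega
        · rw [List.count_cons_of_ne (Ne.symm hxw)] at this
          rwa [List.count_erase_of_ne hxw]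

-- B's per-word Counter comparison is exactly A's consume-loop success
lemma pvPredB_eq_okA (st w : String) :
    ((PySem.Dict.counter w.toList).items.all
      (fun kv => kv.2 ≤ (PySem.Dict.counter st.toList).getD kv.1 0))
      = pvOkA st.toList w.toList := by
  rw [Bool.eq_iff_iff]
  simp only [PySem.Dict.items_counter, List.all_map, Function.comp_def, PySem.Dict.getD_counter,
    List.all_eq_true, decide_eq_true_eq, PySem.Set.mem_ofList, pvOkA_iff]
  constructor
  · intro hall c hc
    exact_mod_cast hall c hc
  · intro hall k hk
    exact_mod_cast hall k hk

-- both programs compute the same count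
lemma pvTotals_eq (st : String) (arr : List String) :
    ((arr.foldl (fun fl word => pvInnerA fl word st.toList word.toList) arr).length : Int)
      = (arr.map (fun word =>
          if (PySem.Dict.counter word.toList).items.all
              (fun kv => kv.2 ≤ (PySem.Dict.counter st.toList).getD kv.1 0)
          then (1 : Int) else 0)).sum := by
  have hA := pvFoldA_length st arr arr (fun w => le_refl _) (le_refl _)
  have hsplit := List.length_eq_countP_add_countP
    (fun w : String => pvOkA st.toList w.toList) (l := arr)
  have hnot : arr.countP (fun a => decide ¬(pvOkA st.toList a.toList = true))
      = arr.countP (fun w => !pvOkA st.toList w.toList) := by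
    apply List.countP_congr
    intro x _
    simp
  rw [hnot] at hsplit
  have hle : arr.countP (fun w => !pvOkA st.toList w.toList) ≤ arr.length :=
    List.countP_le_length
  calc ((arr.foldl (fun fl word => pvInnerA fl word st.toList word.toList) arr).length : Int)
      = ((arr.length - arr.countP (fun w => !pvOkA st.toList w.toList) : Nat) : Int) := by
        rw [hA]
    _ = (arr.countP (fun w : String => pvOkA st.toList w.toList) : Int) := by omega
    _ = _ := by
        have hm : (arr.map (fun word =>
            if (PySem.Dict.counter word.toList).items.all
                (fun kv => kv.2 ≤ (PySem.Dict.counter st.toList).getD kv.1 0)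
            then (1 : Int) else 0))
            = arr.map (fun word => if pvOkA st.toList word.toList then (1 : Int) else 0) :=
          List.map_congr_left (fun word _ => by rw [pvPredB_eq_okA])
        rw [hm, PySem.List.sum_map_ite_one_zero]

-- ===== VERDICT (by name: the statement is the Claim_ definition above) =====
theorem count_feelings_spec : Claim_equal_count_feelings := by
  intro st arr _
  show count_feelings st arr = count_feelings_alt st arr
  unfold count_feelings count_feelings_alt
  dsimp only
  rw [pvTotals_eq st arr]
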